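-- pv_equiv track=rewrite | github.com/hoangduongngg/Python-Basic | Bien_va_kieu_du_lieu_don_gian/ThongKe_DichTe.py | ThongKe
-- ===== SOURCE A (Python) =====
-- def ThongKe (a):
--     n = len(a)
--     m = len(a[0])
--     res = 0
--     b = [] #mang luu trọng số
--     for i in range(0,n):
--         row = []
--         for j in range(0,m):
--             row.append(0)
--         b.append(row)
--
--     for i in range(0,n):
--         for j in range(0,m):
--             if a[i][j] == '-1':
--                 # b[i][j] = -1
--                 for k in range(max(0, i-1), min(i+2, n)):
--                     for l in range(max(0, j-1), min(j+2, m)):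
--                         # if b[k][l] == -1 :
--                         #     res +=1
--                         if b[k][l] ==0:
--                             b[k][l] = int(a[k][l])
--     for i in range(0,n):
--         for j in range(0,m):
--             if b[i][j] >0:
--                 res+=b[i][j]
--     return res
-- ===== SOURCE B (Python) =====
-- def ThongKe(a):
--     # Single pull-based pass: no auxiliary grid; each cell checks its own
--     # clamped 3x3 neighborhood for an infected '-1' cell.
--     n = len(a)
--     m = len(a[0])
--     res = 0
--     for i in range(n):
--         for j in range(m):
--             if any(a[k][l] == '-1'
--                    for k in range(max(0, i - 1), min(i + 2, n))
--                    for l in range(max(0, j - 1), min(j + 2, m))):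
--                 v = int(a[i][j])
--                 if v > 0:
--                     res += v
--     return res
-- ===== Notes on version B (the rewrite author's own statement) =====
-- stated objective: simpler
-- what changed: Replaced A's push-based mark-then-sum strategy (allocate an auxiliary n*m grid b, write int values into b around every '-1' cell, then a second sweep summing positive entries of b) by a single pull-based pass with no auxiliary grid: each cell scans its own clamped 3x3 neighborhood for '-1' and its value is added directly when positive.
import Mathlib
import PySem

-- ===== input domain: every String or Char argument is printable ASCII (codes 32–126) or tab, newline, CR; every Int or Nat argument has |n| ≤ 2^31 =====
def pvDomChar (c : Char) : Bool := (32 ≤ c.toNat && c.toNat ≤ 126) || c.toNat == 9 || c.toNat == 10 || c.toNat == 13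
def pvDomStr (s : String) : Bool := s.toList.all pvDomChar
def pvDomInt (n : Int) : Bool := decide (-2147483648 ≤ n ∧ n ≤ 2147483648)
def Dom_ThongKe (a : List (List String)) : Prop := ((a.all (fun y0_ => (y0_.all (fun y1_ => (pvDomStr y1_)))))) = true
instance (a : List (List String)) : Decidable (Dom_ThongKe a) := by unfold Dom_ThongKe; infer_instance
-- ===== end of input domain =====

-- B drops A's auxiliary mark grid: one pull-based pass in which every cell scans its own
-- clamped 3x3 window for '-1' (objective: simpler; return value only — neither mutates).

-- ===== PORT A =====
-- literal port of A: build an n×m zero grid b, push int values into b around each '-1'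
-- cell (only where b is still 0), then sum the positive entries of b.
-- a[i] / a[i][j] / b[k][l] use the total pyGetD/pySetD forms: Pre_ThongKe excludes exactly
-- the inputs (empty a, a row shorter than row 0, a cell near a '-1' that int() rejects)
-- where Python raises IndexError/ValueError instead of returning.
def ThongKe (a : List (List String)) : Int :=
  let n : Int := a.length
  let m : Int := (PySem.List.pyGetD a 0 []).length
  let b : List (List Int) :=
    (PySem.List.pyRange 0 n 1).foldl (fun b _i =>
      b ++ [(PySem.List.pyRange 0 m 1).foldl (fun row _j => row ++ [(0 : Int)]) []]) []
  let b : List (List Int) :=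
    (PySem.List.pyRange 0 n 1).foldl (fun b i =>
      (PySem.List.pyRange 0 m 1).foldl (fun b j =>
        if PySem.List.pyGetD (PySem.List.pyGetD a i []) j "" == "-1" then
          (PySem.List.pyRange (max 0 (i-1)) (min (i+2) n) 1).foldl (fun b k =>
            (PySem.List.pyRange (max 0 (j-1)) (min (j+2) m) 1).foldl (fun b l =>
              if PySem.List.pyGetD (PySem.List.pyGetD b k []) l 0 == 0 then
                PySem.List.pySetD b k (PySem.List.pySetD (PySem.List.pyGetD b k [])
                  l ((PySem.Int.ofStr? (PySem.List.pyGetD (PySem.List.pyGetD a k []) l "")).getD 0))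
              else b) b) b
        else b) b) b
  (PySem.List.pyRange 0 n 1).foldl (fun res i =>
    (PySem.List.pyRange 0 m 1).foldl (fun res j =>
      if PySem.List.pyGetD (PySem.List.pyGetD b i []) j 0 > 0 then
        res + PySem.List.pyGetD (PySem.List.pyGetD b i []) j 0
      else res) res) 0

-- ===== PORT B =====
-- literal port of Source B: no auxiliary grid; the `any(...)` generator over the clamped
-- window is List.any over the same two ranges (same total pyGetD/int forms as port A).
def ThongKe_alt (a : List (List String)) : Int :=
  let n : Int := a.length
  let m : Int := (PySem.List.pyGetD a 0 []).length
  (PySem.List.pyRange 0 n 1).foldl (fun res i =>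
    (PySem.List.pyRange 0 m 1).foldl (fun res j =>
      if (PySem.List.pyRange (max 0 (i-1)) (min (i+2) n) 1).any (fun k =>
           (PySem.List.pyRange (max 0 (j-1)) (min (j+2) m) 1).any (fun l =>
             PySem.List.pyGetD (PySem.List.pyGetD a k []) l "" == "-1")) then
        if (PySem.Int.ofStr? (PySem.List.pyGetD (PySem.List.pyGetD a i []) j "")).getD 0 > 0 then
          res + (PySem.Int.ofStr? (PySem.List.pyGetD (PySem.List.pyGetD a i []) j "")).getD 0
        else res
      else res) res) 0

-- ===== PRECONDITION & SPEC =====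
-- Pre_ = exactly where Python A returns: a nonempty, every row at least as long as row 0
-- (else IndexError), and every cell whose clamped 3x3 window contains a '-1' cell parses
-- as an int (else ValueError).
def Pre_ThongKe (a : List (List String)) : Prop :=
  a ≠ [] ∧
  (∀ row ∈ a, (a.headD []).length ≤ row.length) ∧
  ((List.range a.length).all fun i => (List.range (a.headD []).length).all fun j =>
   (List.range a.length).all fun k => (List.range (a.headD []).length).all fun l =>
    !((i : Int) - 1 ≤ (k : Int) && (k : Int) ≤ (i : Int) + 1 &&
      (j : Int) - 1 ≤ (l : Int) && (l : Int) ≤ (j : Int) + 1 &&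
      (a.getD k []).getD l "" == "-1") ||
    (PySem.Int.ofStr? ((a.getD i []).getD j "")).isSome) = true
instance (a : List (List String)) : Decidable (Pre_ThongKe a) := by unfold Pre_ThongKe; infer_instance
def pvWitness_ThongKe : List (List String) := [["-1", "2"], ["3", "0"]]
def Spec_ThongKe (a : List (List String)) (out : Int) : Prop := out = ThongKe_alt a
instance (a : List (List String)) (out : Int) : Decidable (Spec_ThongKe a out) := by unfold Spec_ThongKe; infer_instance

-- ===== CLAIM (what is proved, stated in full; the proofs are below) =====
def Claim_equal_ThongKe : Prop := ∀ (a : List (List String)), Dom_ThongKe a → Pre_ThongKe a → Spec_ThongKe a (ThongKe a)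

-- ===== LEMMAS AND PROOFS =====
-- The proof shows the two ports agree on EVERY input (Pre_/Dom_ are not needed for the
-- return-value identity; they delimit where the ports are faithful to the Pythons).
-- Shape: phase 2 of A leaves the grid b holding `pvVal` exactly on the cells covered by
-- the window of some '-1' cell (pvInv, by fold induction), and coverage is symmetric:
-- (k,l) is in the window of (i,j) iff (i,j) is in the window of (k,l) (pv_cov_symm),
-- which is precisely B's pull-based test.

-- row count / row length of the grid, as the ports read them
def pvN (a : List (List String)) : Nat := a.length
def pvM (a : List (List String)) : Nat := (PySem.List.pyGetD a 0 []).length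

-- the string held at (i, j), and the weight int(a[i][j]) in its total form
def pvCell (a : List (List String)) (i j : Int) : String :=
  PySem.List.pyGetD (PySem.List.pyGetD a i []) j ""
def pvVal (a : List (List String)) (i j : Int) : Int :=
  (PySem.Int.ofStr? (pvCell a i j)).getD 0

-- entry (k, l) of the auxiliary grid
def pvGet (b : List (List Int)) (k l : Int) : Int :=
  PySem.List.pyGetD (PySem.List.pyGetD b k []) l 0

-- (k, l) lies in the clamped 3x3 window of (i, j)
def pvWinB (n m i j k l : Int) : Bool :=
  decide (max 0 (i-1) ≤ k) && decide (k < min (i+2) n) &&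
  decide (max 0 (j-1) ≤ l) && decide (l < min (j+2) m)

-- the clamped window of (i, j) as a pair list, row-major
def pvWin (a : List (List String)) (i j : Int) : List (Int × Int) :=
  (PySem.List.pyRange (max 0 (i-1)) (min (i+2) (pvN a : Int)) 1).flatMap fun k =>
    (PySem.List.pyRange (max 0 (j-1)) (min (j+2) (pvM a : Int)) 1).map (Prod.mk k)

-- all cells of the grid, row-major
def pvAll (a : List (List String)) : List (Int × Int) :=
  (PySem.List.pyRange 0 (pvN a : Int) 1).flatMap fun i =>
    (PySem.List.pyRange 0 (pvM a : Int) 1).map (Prod.mk i)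

-- (k, l) has been marked by some '-1' cell among the processed pairs ps
def pvCovB (a : List (List String)) (ps : List (Int × Int)) (k l : Int) : Bool :=
  ps.any fun p => (pvCell a p.1 p.2 == "-1") && pvWinB (pvN a) (pvM a) p.1 p.2 k l

-- phase-2 loop bodies of port A, named
def pvInner (a : List (List String)) (b : List (List Int)) (p : Int × Int) : List (List Int) :=
  if pvGet b p.1 p.2 == 0 then
    PySem.List.pySetD b p.1 (PySem.List.pySetD (PySem.List.pyGetD b p.1 []) p.2 (pvVal a p.1 p.2))
  else b
def pvOuter (a : List (List String)) (b : List (List Int)) (q : Int × Int) : List (List Int) :=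
  if pvCell a q.1 q.2 == "-1" then (pvWin a q.1 q.2).foldl (pvInner a) b else b

-- the phase-2 invariant: b is the n×m grid holding pvVal where covered by ps, else 0
def pvInv (a : List (List String)) (ps : List (Int × Int)) (b : List (List Int)) : Prop :=
  b.length = pvN a ∧ (∀ row ∈ b, row.length = pvM a) ∧
  ∀ k l : Nat, k < pvN a → l < pvM a →
    pvGet b (k : Int) (l : Int) = if pvCovB a ps (k : Int) (l : Int) then pvVal a (k : Int) (l : Int) else 0

-- a nested fold over two ranges is a fold over the row-major pair list
theorem pv_foldl2 {β : Type} (xs : List Int) (ys : Int → List Int)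
    (h : β → Int → Int → β) (init : β) :
    xs.foldl (fun s i => (ys i).foldl (fun s j => h s i j) s) init
      = (xs.flatMap fun i => (ys i).map (Prod.mk i)).foldl (fun s p => h s p.1 p.2) init := by
  induction xs generalizing init with
  | nil => rfl
  | cons x xs ih => simp [List.foldl_append, List.foldl_map, ih]

theorem pv_mem_win {a : List (List String)} {i j : Int} {p : Int × Int} :
    p ∈ pvWin a i j ↔ pvWinB (pvN a) (pvM a) i j p.1 p.2 = true := by
  obtain ⟨k, l⟩ := p
  simp [pvWin, pvWinB, List.mem_flatMap, PySem.List.mem_pyRange_one, and_assoc]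

theorem pv_mem_all {a : List (List String)} {p : Int × Int} :
    p ∈ pvAll a ↔ 0 ≤ p.1 ∧ p.1 < (pvN a : Int) ∧ 0 ≤ p.2 ∧ p.2 < (pvM a : Int) := by
  obtain ⟨k, l⟩ := p
  simp [pvAll, List.mem_flatMap, PySem.List.mem_pyRange_one, and_assoc]

-- one inner (window-cell) step updates exactly the entry of its pair
theorem pv_inner_step (a : List (List String)) (cond : Int → Int → Bool)
    (b : List (List Int)) (p : Int × Int)
    (hp : 0 ≤ p.1 ∧ p.1 < (pvN a : Int) ∧ 0 ≤ p.2 ∧ p.2 < (pvM a : Int))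
    (hlen : b.length = pvN a) (hrow : ∀ row ∈ b, row.length = pvM a)
    (hget : ∀ k l : Nat, k < pvN a → l < pvM a →
      pvGet b (k : Int) (l : Int) = if cond (k : Int) (l : Int) then pvVal a (k : Int) (l : Int) else 0) :
    (pvInner a b p).length = pvN a ∧ (∀ row ∈ pvInner a b p, row.length = pvM a) ∧
    ∀ k l : Nat, k < pvN a → l < pvM a →
      pvGet (pvInner a b p) (k : Int) (l : Int)
        = if cond (k : Int) (l : Int) || (((k : Int), (l : Int)) == p)
          then pvVal a (k : Int) (l : Int) else 0 := by
  obtain ⟨pi, pj⟩ := p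
  obtain ⟨hp1, hp1', hp2, hp2'⟩ := hp
  simp only at hp1 hp1' hp2 hp2'
  obtain ⟨P1, rfl⟩ : ∃ n : Nat, pi = (n : Int) := ⟨pi.toNat, (Int.toNat_of_nonneg hp1).symm⟩
  obtain ⟨P2, rfl⟩ : ∃ n : Nat, pj = (n : Int) := ⟨pj.toNat, (Int.toNat_of_nonneg hp2).symm⟩
  have hP1 : P1 < pvN a := by exact_mod_cast hp1'
  have hP2 : P2 < pvM a := by exact_mod_cast hp2'
  have getb : ∀ (c : List (List Int)) (k l : Nat), pvGet c (k : Int) (l : Int) = (c.getD k []).getD l 0 := by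
    intro c k l; simp [pvGet, PySem.List.pyGetD_natCast]
  have hrowlen : (b.getD P1 []).length = pvM a := by
    rw [List.getD_eq_getElem _ _ (by omega)]
    exact hrow _ (List.getElem_mem _)
  have hbeq : ∀ k l : Nat, ((((k : Int)), ((l : Int))) == (((P1 : Int)), ((P2 : Int))))
      = (decide (k = P1) && decide (l = P2)) := by
    intro k l
    rw [Bool.eq_iff_iff]
    simp [Prod.ext_iff]
  have hsetrow : ∀ (r : List Int) (v : Int) (l : Nat), P2 < r.length →
      (r.set P2 v).getD l 0 = if P2 = l then v else r.getD l 0 := by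
    intro r v l h
    rw [List.getD_eq_getElem?_getD, List.getElem?_set]
    split
    · next he => simp
    · next => rw [List.getD_eq_getElem?_getD]
  by_cases h0 : pvGet b (P1 : Int) (P2 : Int) = 0
  · have hstep : pvInner a b ((P1 : Int), (P2 : Int))
        = b.set P1 ((b.getD P1 []).set P2 (pvVal a (P1 : Int) (P2 : Int))) := by
      rw [pvInner, if_pos (by simpa using h0)]
      simp [PySem.List.pySetD_natCast, PySem.List.pyGetD_natCast]
    refine ⟨by simp [hstep, hlen], ?_, ?_⟩
    · intro row hrw
      rw [hstep] at hrw
      rcases List.mem_or_eq_of_mem_set hrw with h | h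
      · exact hrow _ h
      · rw [h, List.length_set]; exact hrowlen
    · intro k l hk hl
      rw [hstep, getb, hbeq]
      have hset : (b.set P1 ((b.getD P1 []).set P2 (pvVal a (P1 : Int) (P2 : Int)))).getD k []
          = if P1 = k then (b.getD P1 []).set P2 (pvVal a (P1 : Int) (P2 : Int)) else b.getD k [] := by
        rw [List.getD_eq_getElem?_getD, List.getElem?_set]
        split
        · next h => simp [show P1 < b.length by omega]
        · next h => rw [List.getD_eq_getElem?_getD]
      rw [hset]
      by_cases hkP : P1 = k
      · subst hkP
        rw [if_pos rfl, hsetrow _ _ _ (by omega)]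
        by_cases hlP : P2 = l
        · subst hlP
          simp
        · rw [if_neg hlP, ← getb, hget _ _ hk hl]
          simp [Ne.symm hlP]
      · rw [if_neg hkP, ← getb, hget _ _ hk hl]
        simp [Ne.symm hkP]
  · have hstep : pvInner a b ((P1 : Int), (P2 : Int)) = b := by
      rw [pvInner, if_neg (by simpa using h0)]
    refine ⟨by rw [hstep]; exact hlen, by rw [hstep]; exact hrow, ?_⟩
    intro k l hk hl
    rw [hstep, hbeq]
    by_cases hkP : k = P1
    · subst hkP
      by_cases hlP : l = P2
      · subst hlP
        have := hget _ _ hk hl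
        rw [this]
        rw [this] at h0
        by_cases hc : cond (k : Int) (l : Int) = true
        · simp [hc]
        · rw [if_neg hc] at h0; exact absurd rfl h0
      · rw [hget _ _ hk hl]; simp [hlP]
    · rw [hget _ _ hk hl]; simp [hkP]

-- the inner fold over any in-bounds pair list marks exactly its members
theorem pv_inner_fold (a : List (List String)) :
    ∀ (ws : List (Int × Int)) (cond : Int → Int → Bool) (b : List (List Int)),
    (∀ p ∈ ws, 0 ≤ p.1 ∧ p.1 < (pvN a : Int) ∧ 0 ≤ p.2 ∧ p.2 < (pvM a : Int)) →
    b.length = pvN a → (∀ row ∈ b, row.length = pvM a) →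
    (∀ k l : Nat, k < pvN a → l < pvM a →
      pvGet b (k : Int) (l : Int) = if cond (k : Int) (l : Int) then pvVal a (k : Int) (l : Int) else 0) →
    (ws.foldl (pvInner a) b).length = pvN a ∧
    (∀ row ∈ ws.foldl (pvInner a) b, row.length = pvM a) ∧
    ∀ k l : Nat, k < pvN a → l < pvM a →
      pvGet (ws.foldl (pvInner a) b) (k : Int) (l : Int)
        = if cond (k : Int) (l : Int) || ws.contains ((k : Int), (l : Int))
          then pvVal a (k : Int) (l : Int) else 0 := by
  intro ws
  induction ws with
  | nil => intro cond b _ h1 h2 h3; simpa using ⟨h1, h2, h3⟩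
  | cons p ws ih =>
    intro cond b hmem h1 h2 h3
    obtain ⟨h1', h2', h3'⟩ := pv_inner_step a cond b p (hmem p (List.mem_cons_self)) h1 h2 h3
    obtain ⟨g1, g2, g3⟩ := ih (fun k l => cond k l || ((k, l) == p)) (pvInner a b p)
      (fun q hq => hmem q (List.mem_cons_of_mem _ hq)) h1' h2' h3'
    refine ⟨g1, g2, ?_⟩
    intro k l hk hl
    rw [List.foldl_cons, g3 k l hk hl]
    have : (cond (k : Int) (l : Int) || (((k : Int), (l : Int)) == p) || ws.contains ((k : Int), (l : Int)))
        = (cond (k : Int) (l : Int) || (p :: ws).contains ((k : Int), (l : Int))) := by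
      rw [Bool.eq_iff_iff]
      simp [Bool.or_assoc]
    rw [this]

-- one outer step ((i,j) processed) extends coverage by that pair
theorem pv_outer_step (a : List (List String)) (ps : List (Int × Int)) (b : List (List Int))
    (q : Int × Int) (h : pvInv a ps b) : pvInv a (ps ++ [q]) (pvOuter a b q) := by
  obtain ⟨h1, h2, h3⟩ := h
  have hcov : ∀ k l : Int, pvCovB a (ps ++ [q]) k l
      = (pvCovB a ps k l || ((pvCell a q.1 q.2 == "-1") && pvWinB (pvN a) (pvM a) q.1 q.2 k l)) := by
    intro k l; simp [pvCovB, List.any_append]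
  rw [pvOuter]
  by_cases hc : pvCell a q.1 q.2 = "-1"
  · rw [if_pos (by simpa using hc)]
    obtain ⟨g1, g2, g3⟩ := pv_inner_fold a (pvWin a q.1 q.2) (fun k l => pvCovB a ps k l) b
      (fun p hp => by
        have := pv_mem_win.mp hp
        simp only [pvWinB, Bool.and_eq_true, decide_eq_true_eq] at this
        refine ⟨by omega, by omega, by omega, by omega⟩)
      h1 h2 h3
    refine ⟨g1, g2, ?_⟩
    intro k l hk hl
    rw [g3 k l hk hl, hcov]
    have hcon : (pvWin a q.1 q.2).contains ((k : Int), (l : Int))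
        = pvWinB (pvN a) (pvM a) q.1 q.2 (k : Int) (l : Int) := by
      rw [Bool.eq_iff_iff]
      constructor
      · intro hx
        exact pv_mem_win.mp (by simpa using hx)
      · intro hx
        simpa using List.elem_eq_true_of_mem (pv_mem_win.mpr hx)
    rw [hcon]
    simp [hc]
  · rw [if_neg (by simpa using hc)]
    refine ⟨h1, h2, ?_⟩
    intro k l hk hl
    rw [h3 k l hk hl, hcov]
    simp [hc]

theorem pv_outer_fold (a : List (List String)) :
    ∀ (qs ps : List (Int × Int)) (b : List (List Int)),
    pvInv a ps b → pvInv a (ps ++ qs) (qs.foldl (pvOuter a) b) := by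
  intro qs
  induction qs with
  | nil => intro ps b h; simpa using h
  | cons q qs ih =>
    intro ps b h
    have h' := pv_outer_step a ps b q h
    have := ih (ps ++ [q]) (pvOuter a b q) h'
    simpa using this

-- coverage by the whole grid is exactly "some window neighbour is '-1'" (window symmetry)
theorem pv_cov_symm (a : List (List String)) (k l : Nat) (hk : k < pvN a) (hl : l < pvM a) :
    pvCovB a (pvAll a) (k : Int) (l : Int)
      = (PySem.List.pyRange (max 0 ((k : Int) - 1)) (min ((k : Int) + 2) (pvN a : Int)) 1).any
          (fun i => (PySem.List.pyRange (max 0 ((l : Int) - 1)) (min ((l : Int) + 2) (pvM a : Int)) 1).any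
            (fun j => pvCell a i j == "-1")) := by
  rw [Bool.eq_iff_iff]
  simp only [pvCovB, List.any_eq_true, pv_mem_all, PySem.List.mem_pyRange_one,
    Bool.and_eq_true, pvWinB, decide_eq_true_eq, beq_iff_eq]
  constructor
  · rintro ⟨⟨i, j⟩, ⟨hi0, hin, hj0, hjm⟩, hcell, hw⟩
    refine ⟨i, ?_, j, ?_, hcell⟩ <;> simp at hw ⊢ <;> omega
  · rintro ⟨i, hi, j, hj, hcell⟩
    refine ⟨(i, j), ?_, hcell, ?_⟩ <;> simp at hi hj ⊢ <;> omega

-- port A's zero-grid builder satisfies the invariant for the empty pair list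
theorem pv_b0 (a : List (List String)) :
    pvInv a [] ((PySem.List.pyRange 0 (pvN a : Int) 1).foldl (fun b _i =>
      b ++ [(PySem.List.pyRange 0 (pvM a : Int) 1).foldl (fun row _j => row ++ [(0 : Int)]) []]) []) := by
  rw [PySem.List.foldl_append_singleton_eq_map, PySem.List.foldl_append_singleton_eq_map]
  simp only [List.nil_append, List.map_const', PySem.List.length_pyRange_one]
  have e1 : (((pvN a : Nat) : Int) - 0).toNat = pvN a := by omega
  have e2 : (((pvM a : Nat) : Int) - 0).toNat = pvM a := by omega
  rw [e1, e2]
  refine ⟨by simp, ?_, ?_⟩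
  · intro row h
    rw [List.eq_of_mem_replicate h]
    simp
  · intro k l hk hl
    simp [pvCovB, pvGet, PySem.List.pyGetD_natCast, List.getD_eq_getElem?_getD, hk, hl]

-- the phase-2 body of port A, in pair form, is pvOuter
theorem pv_outer_eq (a : List (List String)) :
    (fun (s : List (List Int)) (p : Int × Int) =>
      if (PySem.List.pyGetD (PySem.List.pyGetD a p.1 []) p.2 "" == "-1") = true then
        List.foldl (fun b k =>
          List.foldl (fun b l =>
            if (PySem.List.pyGetD (PySem.List.pyGetD b k []) l 0 == 0) = true then
              PySem.List.pySetD b k (PySem.List.pySetD (PySem.List.pyGetD b k []) l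
                ((PySem.Int.ofStr? (PySem.List.pyGetD (PySem.List.pyGetD a k []) l "")).getD 0))
            else b) b (PySem.List.pyRange (max 0 (p.2 - 1)) (min (p.2 + 2) ((pvM a : Nat) : Int))))
          s (PySem.List.pyRange (max 0 (p.1 - 1)) (min (p.1 + 2) ((pvN a : Nat) : Int)))
      else s)
    = pvOuter a := by
  funext s p
  rw [pvOuter, pv_foldl2]
  rfl

theorem pv_main (a : List (List String)) : ThongKe a = ThongKe_alt a := by
  simp only [ThongKe, ThongKe_alt]
  rw [show (a.length : Int) = ((pvN a : Nat) : Int) from rfl]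
  rw [show ((PySem.List.pyGetD a 0 []).length : Int) = ((pvM a : Nat) : Int) from rfl]
  rw [pv_foldl2, pv_foldl2, pv_foldl2]
  rw [pv_outer_eq]
  rw [show (List.flatMap (fun i => List.map (Prod.mk i) (PySem.List.pyRange 0 ((pvM a : Nat) : Int))) (PySem.List.pyRange 0 ((pvN a : Nat) : Int))) = pvAll a from rfl]
  have hInv := pv_outer_fold a (pvAll a) [] _ (pv_b0 a)
  rw [List.nil_append] at hInv
  apply PySem.List.foldl_congr_mem
  intro acc p hp
  rw [pv_mem_all] at hp
  obtain ⟨pi, pj⟩ := p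
  obtain ⟨h1, h2, h3, h4⟩ := hp
  simp only at h1 h2 h3 h4
  obtain ⟨k, rfl⟩ : ∃ n : Nat, pi = (n : Int) := ⟨pi.toNat, (Int.toNat_of_nonneg h1).symm⟩
  obtain ⟨l, rfl⟩ : ∃ n : Nat, pj = (n : Int) := ⟨pj.toNat, (Int.toNat_of_nonneg h3).symm⟩
  have hk : k < pvN a := by exact_mod_cast h2
  have hl : l < pvM a := by exact_mod_cast h4
  have hval := hInv.2.2 k l hk hl
  simp only [pvGet] at hval
  simp only
  rw [hval]
  have hsym := pv_cov_symm a k l hk hl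
  simp only [pvCell] at hsym
  rw [← hsym]
  by_cases hcv : pvCovB a (pvAll a) (k : Int) (l : Int) = true
  · simp [hcv, pvVal, pvCell]
  · simp [hcv]

-- ===== VERDICT (by name: the statement is the Claim_ definition above) =====
theorem ThongKe_spec : Claim_equal_ThongKe := by
  intro a _ _
  unfold Spec_ThongKe
  exact pv_main a
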